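-- pv_equiv track=rewrite | github.com/latedeployment/oci2bin | scripts/build_polyglot.py | tar_checksum
-- ===== SOURCE A (Python) =====
-- def tar_checksum(header_bytes):
--     """Compute the tar checksum: sum of all bytes, treating chksum field as spaces."""
--     total = 0
--     for i, b in enumerate(header_bytes):
--         if 148 <= i < 156:
--             total += ord(' ')
--         else:
--             total += b
--     return total
-- ===== SOURCE B (Python) =====
-- def tar_checksum(header_bytes):
--     """Compute the tar checksum: sum of all bytes, treating chksum field as spaces."""
--     return (sum(header_bytes[:148])
--             + ord(' ') * len(header_bytes[148:156])
--             + sum(header_bytes[156:]))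
-- ===== Notes on version B (the rewrite author's own statement) =====
-- stated objective: simpler
-- what changed: Replaces the indexed loop with a per-element conditional by a three-way slice decomposition: sum the prefix [:148], count the checksum-field slice [148:156] at ord(' ') each, and sum the suffix [156:]; slicing clamps so short headers need no index bookkeeping.
import Mathlib
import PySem

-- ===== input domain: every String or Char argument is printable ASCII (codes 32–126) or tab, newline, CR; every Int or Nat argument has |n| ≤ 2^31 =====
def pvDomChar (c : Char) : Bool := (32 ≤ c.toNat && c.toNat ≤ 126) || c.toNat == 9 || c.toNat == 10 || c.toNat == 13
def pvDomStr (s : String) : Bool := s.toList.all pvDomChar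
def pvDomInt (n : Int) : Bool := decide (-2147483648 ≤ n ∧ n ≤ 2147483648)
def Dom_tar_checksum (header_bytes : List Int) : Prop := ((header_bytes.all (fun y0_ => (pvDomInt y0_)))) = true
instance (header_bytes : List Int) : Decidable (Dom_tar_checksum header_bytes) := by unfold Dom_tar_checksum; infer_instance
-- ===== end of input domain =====

-- B replaces A's indexed loop with a per-element conditional by a three-way slice
-- decomposition: sum of the prefix [:148], ord(' ') times the length of the checksum
-- slice [148:156], plus the sum of the suffix [156:] (objective: simpler).

-- ===== PORT A =====
-- for i, b in enumerate(header_bytes): total += 32 if 148 <= i < 156 else b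
def tar_checksum (header_bytes : List Int) : Int :=
  (PySem.List.enumerate header_bytes 0).foldl
    (fun total p => if 148 ≤ p.1 ∧ p.1 < 156 then total + 32 else total + p.2) 0

-- ===== PORT B =====
-- sum(xs[:148]) + 32 * len(xs[148:156]) + sum(xs[156:])
def tar_checksum_alt (header_bytes : List Int) : Int :=
  (PySem.List.slice header_bytes none (some 148)).sum
  + 32 * ((PySem.List.slice header_bytes (some 148) (some 156)).length : Int)
  + (PySem.List.slice header_bytes (some 156) none).sum

-- ===== PRECONDITION & SPEC =====
def Spec_tar_checksum (header_bytes : List Int) (out : Int) : Prop := out = tar_checksum_alt header_bytes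
instance (header_bytes : List Int) (out : Int) : Decidable (Spec_tar_checksum header_bytes out) := by unfold Spec_tar_checksum; infer_instance

-- ===== CLAIM (what is proved, stated in full; the proofs are below) =====
def Claim_equal_tar_checksum : Prop := ∀ (header_bytes : List Int), Dom_tar_checksum header_bytes → Spec_tar_checksum header_bytes (tar_checksum header_bytes)

-- ===== LEMMAS AND PROOFS =====

-- core invariant: the conditional enumerate-sum starting at index s equals the sum of
-- the prefix before the window, 32 per element of the window slice, and the suffix sum
theorem tar_checksum_core (xs : List Int) : ∀ (s : Int),
    ((PySem.List.enumerate xs s).map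
        (fun p => if 148 ≤ p.1 ∧ p.1 < 156 then (32 : Int) else p.2)).sum
      = (xs.take (148 - s).toNat).sum
        + 32 * (((xs.drop (148 - s).toNat).take ((156 - s).toNat - (148 - s).toNat)).length : Int)
        + (xs.drop (156 - s).toNat).sum := by
  induction xs with
  | nil => intro s; simp [PySem.List.enumerate_nil]
  | cons x xs ih =>
      intro s
      rw [PySem.List.enumerate_cons]
      simp only [List.map_cons, List.sum_cons, ih (s + 1)]
      rcases lt_or_ge s 148 with h1 | h1
      · have ha : (148 - s).toNat = (148 - (s + 1)).toNat + 1 := by omega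
        have hb : (156 - s).toNat = (156 - (s + 1)).toNat + 1 := by omega
        have hd : (156 - (s + 1)).toNat + 1 - ((148 - (s + 1)).toNat + 1)
            = (156 - (s + 1)).toNat - (148 - (s + 1)).toNat := by omega
        rw [if_neg (by omega), ha, hb, hd, List.take_succ_cons, List.drop_succ_cons,
            List.drop_succ_cons, List.sum_cons]
        ring
      rcases lt_or_ge s 156 with h2 | h2
      · have ha : (148 - s).toNat = 0 := by omega
        have ha' : (148 - (s + 1)).toNat = 0 := by omega
        have hb' : (156 - s).toNat = (156 - (s + 1)).toNat + 1 := by omega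
        rw [if_pos ⟨by omega, h2⟩]
        simp only [ha, ha', Nat.sub_zero, hb', List.take_zero, List.drop_zero,
            List.take_succ_cons, List.drop_succ_cons, List.length_cons, List.sum_nil]
        push_cast
        ring
      · have ha : (148 - s).toNat = 0 := by omega
        have ha' : (148 - (s + 1)).toNat = 0 := by omega
        have hb : (156 - s).toNat = 0 := by omega
        have hb' : (156 - (s + 1)).toNat = 0 := by omega
        rw [if_neg (by omega), ha, ha', hb, hb']
        simp

theorem tar_checksum_eq (xs : List Int) : tar_checksum xs = tar_checksum_alt xs := by
  unfold tar_checksum tar_checksum_alt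
  have hA : (fun (total : Int) (p : Int × Int) =>
        if 148 ≤ p.1 ∧ p.1 < 156 then total + 32 else total + p.2)
      = (fun total p => total + (if 148 ≤ p.1 ∧ p.1 < 156 then (32 : Int) else p.2)) := by
    funext t p; split <;> ring
  rw [hA,
      PySem.List.foldl_add _ (fun p : Int × Int => if 148 ≤ p.1 ∧ p.1 < 156 then (32:Int) else p.2) 0,
      PySem.List.slice_to xs (by norm_num : (0:Int) ≤ 148),
      PySem.List.slice_toNat xs (by norm_num : (0:Int) ≤ 148) (by norm_num : (0:Int) ≤ 156),
      PySem.List.slice_from xs (by norm_num : (0:Int) ≤ 156)]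
  have h := tar_checksum_core xs 0
  simp only [sub_zero] at h
  rw [h]
  ring

-- ===== VERDICT (by name: the statement is the Claim_ definition above) =====
theorem tar_checksum_spec : Claim_equal_tar_checksum := by
  intro xs _
  unfold Spec_tar_checksum
  exact tar_checksum_eq xs
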